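-- pv_equiv track=rewrite | github.com/Risha1234/Synapse_Tasks | Task_1_3.py | bombard_region
-- ===== SOURCE A (Python) =====
-- def bombard_region(grid, m):
--   n = len(grid)
--   best_count = 0
--   best_coordinate = None
--   destroyed = []
--
--   r = m // 2
--
--   for y in range(r, n-r):
--     for x in range(r,n-r):
--        if grid[y][x] == 1:
--                   coordinate = []
--                   count = 0
--
--                   for dy in range(-r,r+1):
--                        for dx in range(-r,r+1):
--                             if grid[y+dy][x+dx] == 1:
--                                 count += 1
--                                 coordinate.append((x+dx,y+dy))
--
--                   if count > best_count:
--                       best_count = count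
--                       best_coordinate = (x,y)
--                       destroyed = coordinate
--   return best_coordinate, destroyed
-- ===== SOURCE B (Python) =====
-- def bombard_region(grid, m):
--     n = len(grid)
--     r = m // 2
--     best_count = 0
--     best = None
--     if r < n - r:
--         # 2D prefix sums: P[i][j] = number of 1s in grid[:i][:j]
--         P = [[0] * (n + 1)]
--         for i in range(n):
--             prev = P[-1]
--             row = [0]
--             for j in range(n):
--                 row.append(prev[j + 1] + row[j] - prev[j] + (1 if grid[i][j] == 1 else 0))
--             P.append(row)
--         for y in range(r, n - r):
--             for x in range(r, n - r):
--                 if grid[y][x] == 1: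
--                     c = P[y + r + 1][x + r + 1] - P[y - r][x + r + 1] - P[y + r + 1][x - r] + P[y - r][x - r]
--                     if c > best_count:
--                         best_count = c
--                         best = (x, y)
--     if best is None:
--         return None, []
--     bx, by = best
--     destroyed = [(bx + dx, by + dy) for dy in range(-r, r + 1) for dx in range(-r, r + 1) if grid[by + dy][bx + dx] == 1]
--     return best, destroyed
-- ===== Notes on version B (the rewrite author's own statement) =====
-- stated objective: alternative
-- what changed: Replaces A's per-center nested dy/dx window recount (which builds a coordinate list for every candidate center) with a 2D prefix-sum table for the window counts, reconstructing the coordinate list only once, for the winning center.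
-- outside the precondition, e.g. on bombard_region([[0, 0], [0, 0], [0]], 2): A returns (None, []), B raises IndexError
import Mathlib
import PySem

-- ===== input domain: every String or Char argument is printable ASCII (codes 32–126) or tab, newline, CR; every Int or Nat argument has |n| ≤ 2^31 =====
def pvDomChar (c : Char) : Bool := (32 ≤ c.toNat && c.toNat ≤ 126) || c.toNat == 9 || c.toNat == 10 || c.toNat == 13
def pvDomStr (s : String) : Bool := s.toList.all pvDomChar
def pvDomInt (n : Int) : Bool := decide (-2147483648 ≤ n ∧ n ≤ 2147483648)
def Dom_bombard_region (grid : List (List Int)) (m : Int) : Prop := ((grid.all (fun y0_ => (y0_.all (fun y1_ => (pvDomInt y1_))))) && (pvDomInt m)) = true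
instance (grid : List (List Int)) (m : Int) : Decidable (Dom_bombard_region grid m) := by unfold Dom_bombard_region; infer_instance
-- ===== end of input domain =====

-- B replaces A's per-center nested window recount by a 2D prefix-sum table for the counts,
-- rebuilding the destroyed-coordinate list only for the winning center (no mutation; return value only).

-- ===== PORT A =====
def bombard_region (grid : List (List Int)) (m : Int) : (Option (Int × Int)) × (List (Int × Int)) :=
  let n : Int := grid.length
  let r : Int := PySem.Int.floordiv m 2
  let st :=
    (PySem.List.pyRange r (n - r) 1).foldl (fun st y =>
      (PySem.List.pyRange r (n - r) 1).foldl (fun st x =>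
        if PySem.List.pyGetD (PySem.List.pyGetD grid y []) x 0 = 1 then
          let inner :=
            (PySem.List.pyRange (-r) (r + 1) 1).foldl (fun ic dy =>
              (PySem.List.pyRange (-r) (r + 1) 1).foldl (fun ic dx =>
                if PySem.List.pyGetD (PySem.List.pyGetD grid (y + dy) []) (x + dx) 0 = 1 then
                  (ic.1 + 1, ic.2 ++ [(x + dx, y + dy)])
                else ic) ic) ((0 : Int), ([] : List (Int × Int)))
          if inner.1 > st.1 then (inner.1, some (x, y), inner.2) else st
        else st) st)
      ((0 : Int), (none : Option (Int × Int)), ([] : List (Int × Int)))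
  (st.2.1, st.2.2)

-- ===== PORT B =====
def bombard_region_alt (grid : List (List Int)) (m : Int) : (Option (Int × Int)) × (List (Int × Int)) :=
  let n : Int := grid.length
  let r : Int := PySem.Int.floordiv m 2
  let st :=
    if r < n - r then
      let P :=
        (PySem.List.pyRange 0 n 1).foldl (fun P i =>
          let prev := PySem.List.pyGetD P (-1) []
          let row :=
            (PySem.List.pyRange 0 n 1).foldl (fun row j =>
              row ++ [PySem.List.pyGetD prev (j + 1) 0 + PySem.List.pyGetD row j 0
                        - PySem.List.pyGetD prev j 0
                        + (if PySem.List.pyGetD (PySem.List.pyGetD grid i []) j 0 = 1 then 1 else 0)])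
              [(0 : Int)]
          P ++ [row]) [List.replicate (n + 1).toNat (0 : Int)]
      (PySem.List.pyRange r (n - r) 1).foldl (fun st y =>
        (PySem.List.pyRange r (n - r) 1).foldl (fun st x =>
          if PySem.List.pyGetD (PySem.List.pyGetD grid y []) x 0 = 1 then
            let c := PySem.List.pyGetD (PySem.List.pyGetD P (y + r + 1) []) (x + r + 1) 0
                   - PySem.List.pyGetD (PySem.List.pyGetD P (y - r) []) (x + r + 1) 0
                   - PySem.List.pyGetD (PySem.List.pyGetD P (y + r + 1) []) (x - r) 0
                   + PySem.List.pyGetD (PySem.List.pyGetD P (y - r) []) (x - r) 0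
            if c > st.1 then (c, some (x, y)) else st
          else st) st)
        ((0 : Int), (none : Option (Int × Int)))
    else ((0 : Int), (none : Option (Int × Int)))
  match st.2 with
  | none => (none, [])
  | some (bx, by_) =>
    (some (bx, by_),
      (PySem.List.pyRange (-r) (r + 1) 1).flatMap (fun dy =>
        ((PySem.List.pyRange (-r) (r + 1) 1).filter (fun dx =>
            decide (PySem.List.pyGetD (PySem.List.pyGetD grid (by_ + dy) []) (bx + dx) 0 = 1))).map
          (fun dx => (bx + dx, by_ + dy))))

-- ===== PRECONDITION & SPEC =====
-- Pre_ excludes negative m (the negative radius makes A's scan reach row index n, raising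
-- IndexError) and, when the scan range is nonempty, grids with a row shorter than the number
-- of rows, on which A's (and B's) direct indexing can raise IndexError; see claim.json
-- "cites" for an excluded corner input on which A still returns.
def Pre_bombard_region (grid : List (List Int)) (m : Int) : Prop :=
  0 ≤ m ∧ (PySem.Int.floordiv m 2 < (grid.length : Int) - PySem.Int.floordiv m 2 →
    ∀ row ∈ grid, grid.length ≤ row.length)

instance (grid : List (List Int)) (m : Int) : Decidable (Pre_bombard_region grid m) := by
  unfold Pre_bombard_region; infer_instance

def pvWitness_bombard_region : List (List Int) × Int := ([[1, 0, 1], [0, 1, 0], [1, 0, 0]], 2)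

def Spec_bombard_region (grid : List (List Int)) (m : Int) (out : (Option (Int × Int)) × (List (Int × Int))) : Prop := out = bombard_region_alt grid m
instance (grid : List (List Int)) (m : Int) (out : (Option (Int × Int)) × (List (Int × Int))) : Decidable (Spec_bombard_region grid m out) := by unfold Spec_bombard_region; infer_instance

-- ===== CLAIM (what is proved, stated in full; the proofs are below) =====
def Claim_equal_bombard_region : Prop := ∀ (grid : List (List Int)) (m : Int), Dom_bombard_region grid m → Pre_bombard_region grid m → Spec_bombard_region grid m (bombard_region grid m)

-- ===== LEMMAS AND PROOFS =====

-- cell indicator, exactly as both ports read the grid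
def pvInd (grid : List (List Int)) (i j : Int) : Int :=
  if PySem.List.pyGetD (PySem.List.pyGetD grid i []) j 0 = 1 then 1 else 0

-- 2D prefix sum specification
def pvS (grid : List (List Int)) (a b : Nat) : Int :=
  ∑ i ∈ Finset.range a, ∑ j ∈ Finset.range b, pvInd grid (i : Int) (j : Int)

-- the coordinate list collected around center (x, y)
def pvCoords (grid : List (List Int)) (r x y : Int) : List (Int × Int) :=
  (PySem.List.pyRange (-r) (r + 1) 1).flatMap (fun dy =>
    ((PySem.List.pyRange (-r) (r + 1) 1).filter (fun dx =>
        decide (PySem.List.pyGetD (PySem.List.pyGetD grid (y + dy) []) (x + dx) 0 = 1))).map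
      (fun dx => (x + dx, y + dy)))

-- the window count collected around center (x, y)
def pvCnt (grid : List (List Int)) (r x y : Int) : Int :=
  ((PySem.List.pyRange (-r) (r + 1) 1).map (fun dy =>
    ((PySem.List.pyRange (-r) (r + 1) 1).map (fun dx =>
      pvInd grid (y + dy) (x + dx))).sum)).sum

def pvRebuild (grid : List (List Int)) (r : Int) : Option (Int × Int) → List (Int × Int)
  | none => []
  | some (x, y) => pvCoords grid r x y

theorem pv_sum_map_range (f : Int → Int) (n : Nat) :
    ((List.range n).map (fun k : Nat => f (k : Int))).sum = ∑ k ∈ Finset.range n, f (k : Int) := by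
  induction n with
  | zero => simp
  | succ n ih => rw [List.range_succ]; simp [Finset.sum_range_succ, ih]

theorem pv_inner_fold (grid : List (List Int)) (y x : Int) (l : List Int)
    (c0 : Int) (acc : List (Int × Int)) (dy : Int) :
    l.foldl (fun ic dx =>
      if PySem.List.pyGetD (PySem.List.pyGetD grid (y + dy) []) (x + dx) 0 = 1 then
        (ic.1 + 1, ic.2 ++ [(x + dx, y + dy)])
      else ic) (c0, acc)
    = (c0 + ((l.map (fun dx => pvInd grid (y + dy) (x + dx))).sum),
       acc ++ ((l.filter (fun dx =>
          decide (PySem.List.pyGetD (PySem.List.pyGetD grid (y + dy) []) (x + dx) 0 = 1))).map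
          (fun dx => (x + dx, y + dy)))) := by
  induction l generalizing c0 acc with
  | nil => simp
  | cons d l ih =>
    by_cases h : PySem.List.pyGetD (PySem.List.pyGetD grid (y + dy) []) (x + d) 0 = 1 <;>
      simp [List.foldl_cons, h, ih, pvInd] <;> ring_nf

theorem pv_outer_fold (grid : List (List Int)) (r y x : Int) (l : List Int)
    (c0 : Int) (acc : List (Int × Int)) :
    l.foldl (fun ic dy =>
      (PySem.List.pyRange (-r) (r + 1) 1).foldl (fun ic dx =>
        if PySem.List.pyGetD (PySem.List.pyGetD grid (y + dy) []) (x + dx) 0 = 1 then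
          (ic.1 + 1, ic.2 ++ [(x + dx, y + dy)])
        else ic) ic) (c0, acc)
    = (c0 + ((l.map (fun dy =>
          ((PySem.List.pyRange (-r) (r + 1) 1).map (fun dx => pvInd grid (y + dy) (x + dx))).sum)).sum),
       acc ++ l.flatMap (fun dy =>
        ((PySem.List.pyRange (-r) (r + 1) 1).filter (fun dx =>
            decide (PySem.List.pyGetD (PySem.List.pyGetD grid (y + dy) []) (x + dx) 0 = 1))).map
          (fun dx => (x + dx, y + dy)))) := by
  induction l generalizing c0 acc with
  | nil => simp
  | cons d l ih =>
    simp [List.foldl_cons, pv_inner_fold, ih, List.flatMap_cons, add_assoc]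

-- A's inner double loop computes (pvCnt, pvCoords)
theorem pv_innerA (grid : List (List Int)) (r y x : Int) :
    (PySem.List.pyRange (-r) (r + 1) 1).foldl (fun ic dy =>
      (PySem.List.pyRange (-r) (r + 1) 1).foldl (fun ic dx =>
        if PySem.List.pyGetD (PySem.List.pyGetD grid (y + dy) []) (x + dx) 0 = 1 then
          (ic.1 + 1, ic.2 ++ [(x + dx, y + dy)])
        else ic) ic) ((0 : Int), ([] : List (Int × Int)))
    = (pvCnt grid r x y, pvCoords grid r x y) := by
  simp [pv_outer_fold, pvCnt, pvCoords]

-- range-shift for map-sums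
theorem pv_map_shift (f : Int → Int) (a b c : Int) :
    ((PySem.List.pyRange a b 1).map (fun d => f (c + d))).sum
    = ((PySem.List.pyRange (c + a) (c + b) 1).map f).sum := by
  have h : c + b - (c + a) = b - a := by ring
  simp only [PySem.List.pyRange_one, List.map_map, h]
  apply congrArg
  refine List.map_congr_left fun k _ => ?_
  simp only [Function.comp_apply]
  ring_nf

-- sum over pyRange 0 b of f equals Finset sum
theorem pv_sum_pyRange_zero (f : Int → Int) (b : Int) (_hb : 0 ≤ b) :
    ((PySem.List.pyRange 0 b 1).map f).sum = ∑ k ∈ Finset.range b.toNat, f (k : Int) := by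
  rw [PySem.List.pyRange_one, List.map_map]
  have h0 : (b - 0).toNat = b.toNat := by simp
  rw [h0, ← pv_sum_map_range f b.toNat]
  apply congrArg
  refine List.map_congr_left fun k _ => ?_
  simp

-- sum over pyRange a b of f (0 ≤ a ≤ b) equals difference of Finset sums
theorem pv_sum_pyRange (f : Int → Int) (a b : Int) (ha : 0 ≤ a) (hab : a ≤ b) :
    ((PySem.List.pyRange a b 1).map f).sum
    = (∑ k ∈ Finset.range b.toNat, f (k : Int)) - ∑ k ∈ Finset.range a.toNat, f (k : Int) := by
  have hsplit := PySem.List.pyRange_one_append 0 a b ha hab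
  rw [← pv_sum_pyRange_zero f b (le_trans ha hab), ← pv_sum_pyRange_zero f a ha, hsplit]
  simp

-- row-range sum helper
def pvRowRange (grid : List (List Int)) (c r : Int) (i : Int) : Int :=
  (∑ k ∈ Finset.range (c + r + 1).toNat, pvInd grid i (k : Int))
    - ∑ k ∈ Finset.range (c - r).toNat, pvInd grid i (k : Int)

theorem pv_sum_center (f : Int → Int) (r c : Int) (hr : 0 ≤ r) (hc : r ≤ c) :
    ((PySem.List.pyRange (-r) (r + 1) 1).map (fun d => f (c + d))).sum
    = (∑ k ∈ Finset.range (c + r + 1).toNat, f (k : Int))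
      - ∑ k ∈ Finset.range (c - r).toNat, f (k : Int) := by
  have h1 := pv_map_shift f (-r) (r + 1) c
  have e1 : c + -r = c - r := by ring
  have e2 : c + (r + 1) = c + r + 1 := by ring
  rw [e1, e2] at h1
  rw [h1, pv_sum_pyRange f _ _ (by omega) (by omega)]

-- pvCnt as prefix-sum difference
theorem pv_cnt_eq_S (grid : List (List Int)) (r y x : Int) (hr : 0 ≤ r)
    (hy : r ≤ y) (hx : r ≤ x) :
    pvCnt grid r x y
    = pvS grid (y + r + 1).toNat (x + r + 1).toNat - pvS grid (y - r).toNat (x + r + 1).toNat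
      - pvS grid (y + r + 1).toNat (x - r).toNat + pvS grid (y - r).toNat (x - r).toNat := by
  have hinner : ∀ dy : Int,
      ((PySem.List.pyRange (-r) (r + 1) 1).map (fun dx => pvInd grid (y + dy) (x + dx))).sum
      = pvRowRange grid x r (y + dy) := by
    intro dy
    rw [pv_sum_center (pvInd grid (y + dy)) r x hr hx]
    rfl
  unfold pvCnt
  rw [List.map_congr_left (fun dy _ => hinner dy),
      pv_sum_center (pvRowRange grid x r) r y hr hy]
  simp only [pvRowRange, pvS, Finset.sum_sub_distrib]
  ring

-- one row of the prefix table
def pvRowFn (grid : List (List Int)) (i : Nat) : List Int :=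
  (List.range (grid.length + 1)).map (fun j => pvS grid i j)

theorem pvS_rec (grid : List (List Int)) (a b : Nat) :
    pvS grid (a + 1) (b + 1)
    = pvS grid a (b + 1) + pvS grid (a + 1) b - pvS grid a b + pvInd grid (a : Int) (b : Int) := by
  simp [pvS, Finset.sum_range_succ, Finset.sum_add_distrib]
  ring

theorem pv_row_aux (grid : List (List Int)) (iN : Nat) :
    ∀ (k : Nat), k ≤ grid.length →
    (PySem.List.pyRange 0 (k : Int) 1).foldl (fun row j =>
        row ++ [PySem.List.pyGetD (pvRowFn grid iN) (j + 1) 0 + PySem.List.pyGetD row j 0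
                  - PySem.List.pyGetD (pvRowFn grid iN) j 0
                  + (if PySem.List.pyGetD (PySem.List.pyGetD grid (iN : Int) []) j 0 = 1 then 1 else 0)])
      [(0 : Int)]
    = (List.range (k + 1)).map (fun j => pvS grid (iN + 1) j) := by
  intro k
  induction k with
  | zero =>
    intro _
    rw [PySem.List.pyRange_one_eq_nil (a := (0 : Int)) (b := ((0 : Nat) : Int)) (by norm_num)]
    simp [List.range_succ, pvS]
  | succ k ih =>
    intro hk
    have hk' : k ≤ grid.length := by omega
    have hcast : ((k + 1 : Nat) : Int) = (k : Int) + 1 := by push_cast; ring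
    rw [hcast, PySem.List.pyRange_one_succ_right (by positivity), List.foldl_append, ih hk']
    simp only [List.foldl_cons, List.foldl_nil]
    have g1 : PySem.List.pyGetD (pvRowFn grid iN) ((k : Int) + 1) 0 = pvS grid iN (k + 1) := by
      have : ((k : Int) + 1) = ((k + 1 : Nat) : Int) := by push_cast; ring
      rw [this, PySem.List.pyGetD_natCast]
      exact PySem.List.getD_map_range _ _ _ _ (by omega)
    have g2 : PySem.List.pyGetD ((List.range (k + 1)).map (fun j => pvS grid (iN + 1) j)) (k : Int) 0
        = pvS grid (iN + 1) k := by
      rw [PySem.List.pyGetD_natCast]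
      exact PySem.List.getD_map_range _ _ _ _ (by omega)
    have g3 : PySem.List.pyGetD (pvRowFn grid iN) (k : Int) 0 = pvS grid iN k := by
      rw [PySem.List.pyGetD_natCast]
      exact PySem.List.getD_map_range _ _ _ _ (by omega)
    rw [g1, g2, g3]
    have hval : pvS grid iN (k + 1) + pvS grid (iN + 1) k - pvS grid iN k
        + (if PySem.List.pyGetD (PySem.List.pyGetD grid (iN : Int) []) (k : Int) 0 = 1 then (1:Int) else 0)
        = pvS grid (iN + 1) (k + 1) := by
      rw [pvS_rec grid iN k]
      simp [pvInd]
    rw [hval]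
    simp [List.range_succ]

-- the prefix table built by B
theorem pv_P_aux (grid : List (List Int)) :
    ∀ (k : Nat), k ≤ grid.length →
    (PySem.List.pyRange 0 (k : Int) 1).foldl (fun P i =>
      let prev := PySem.List.pyGetD P (-1) []
      let row :=
        (PySem.List.pyRange 0 (grid.length : Int) 1).foldl (fun row j =>
          row ++ [PySem.List.pyGetD prev (j + 1) 0 + PySem.List.pyGetD row j 0
                    - PySem.List.pyGetD prev j 0
                    + (if PySem.List.pyGetD (PySem.List.pyGetD grid i []) j 0 = 1 then 1 else 0)])
          [(0 : Int)]
      P ++ [row]) [pvRowFn grid 0]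
    = (List.range (k + 1)).map (fun i => pvRowFn grid i) := by
  intro k
  induction k with
  | zero =>
    intro _
    rw [PySem.List.pyRange_one_eq_nil (a := (0 : Int)) (b := ((0 : Nat) : Int)) (by norm_num)]
    simp [List.range_succ]
  | succ k ih =>
    intro hk
    have hk' : k ≤ grid.length := by omega
    have hcast : ((k + 1 : Nat) : Int) = (k : Int) + 1 := by push_cast; ring
    rw [hcast, PySem.List.pyRange_one_succ_right (a := (0 : Int)) (b := ((k : Nat) : Int)) (by positivity), List.foldl_append, ih hk']
    simp only [List.foldl_cons, List.foldl_nil]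
    have hprev : PySem.List.pyGetD ((List.range (k + 1)).map (fun i => pvRowFn grid i)) (-1) []
        = pvRowFn grid k := by
      rw [List.range_succ, List.map_append]
      exact PySem.List.pyGetD_neg_one_append_singleton _ _ _
    rw [hprev]
    have hrow := pv_row_aux grid k grid.length le_rfl
    rw [hrow]
    rw [List.range_succ (n := k + 1), List.map_append]
    rfl

theorem pv_repl_eq_row0 (grid : List (List Int)) :
    List.replicate ((grid.length : Int) + 1).toNat (0 : Int) = pvRowFn grid 0 := by
  have h : ((grid.length : Int) + 1).toNat = grid.length + 1 := by omega
  rw [h, pvRowFn]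
  rw [show (fun j => pvS grid 0 j) = (fun _ : Nat => (0 : Int)) from funext fun j => by simp [pvS]]
  rw [List.map_const']
  simp

theorem pv_P_eq (grid : List (List Int)) :
    (PySem.List.pyRange 0 (grid.length : Int) 1).foldl (fun P i =>
      let prev := PySem.List.pyGetD P (-1) []
      let row :=
        (PySem.List.pyRange 0 (grid.length : Int) 1).foldl (fun row j =>
          row ++ [PySem.List.pyGetD prev (j + 1) 0 + PySem.List.pyGetD row j 0
                    - PySem.List.pyGetD prev j 0
                    + (if PySem.List.pyGetD (PySem.List.pyGetD grid i []) j 0 = 1 then 1 else 0)])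
          [(0 : Int)]
      P ++ [row]) [List.replicate ((grid.length : Int) + 1).toNat (0 : Int)]
    = (List.range (grid.length + 1)).map (fun i => pvRowFn grid i) := by
  rw [pv_repl_eq_row0]
  exact pv_P_aux grid grid.length le_rfl

-- evaluating one prefix-table lookup
theorem pv_P_lookup (grid : List (List Int)) (i j : Int)
    (hi0 : 0 ≤ i) (hi1 : i ≤ (grid.length : Int)) (hj0 : 0 ≤ j) (hj1 : j ≤ (grid.length : Int)) :
    PySem.List.pyGetD (PySem.List.pyGetD ((List.range (grid.length + 1)).map (fun i => pvRowFn grid i)) i []) j 0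
    = pvS grid i.toNat j.toNat := by
  obtain ⟨iN, rfl⟩ : ∃ iN : Nat, i = (iN : Int) := ⟨i.toNat, (Int.toNat_of_nonneg hi0).symm⟩
  obtain ⟨jN, rfl⟩ : ∃ jN : Nat, j = (jN : Int) := ⟨j.toNat, (Int.toNat_of_nonneg hj0).symm⟩
  rw [PySem.List.pyGetD_natCast, PySem.List.pyGetD_natCast,
      PySem.List.getD_map_range _ _ _ _ (by omega), pvRowFn,
      PySem.List.getD_map_range _ _ _ _ (by omega)]
  simp

theorem pv_c_eq (grid : List (List Int)) (r y x : Int) (hr : 0 ≤ r)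
    (hy1 : r ≤ y) (hy2 : y < (grid.length : Int) - r)
    (hx1 : r ≤ x) (hx2 : x < (grid.length : Int) - r) :
    PySem.List.pyGetD (PySem.List.pyGetD ((List.range (grid.length + 1)).map (fun i => pvRowFn grid i)) (y + r + 1) []) (x + r + 1) 0
    - PySem.List.pyGetD (PySem.List.pyGetD ((List.range (grid.length + 1)).map (fun i => pvRowFn grid i)) (y - r) []) (x + r + 1) 0
    - PySem.List.pyGetD (PySem.List.pyGetD ((List.range (grid.length + 1)).map (fun i => pvRowFn grid i)) (y + r + 1) []) (x - r) 0
    + PySem.List.pyGetD (PySem.List.pyGetD ((List.range (grid.length + 1)).map (fun i => pvRowFn grid i)) (y - r) []) (x - r) 0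
    = pvCnt grid r x y := by
  rw [pv_P_lookup grid _ _ (by omega) (by omega) (by omega) (by omega),
      pv_P_lookup grid _ _ (by omega) (by omega) (by omega) (by omega),
      pv_P_lookup grid _ _ (by omega) (by omega) (by omega) (by omega),
      pv_P_lookup grid _ _ (by omega) (by omega) (by omega) (by omega)]
  exact (pv_cnt_eq_S grid r y x hr hy1 hx1).symm

theorem pv_scan_x (grid : List (List Int)) (r y : Int) (hr : 0 ≤ r)
    (hy1 : r ≤ y) (hy2 : y < (grid.length : Int) - r) :
    ∀ (xs : List Int), (∀ x ∈ xs, r ≤ x ∧ x < (grid.length : Int) - r) →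
    ∀ (bc : Int) (b : Option (Int × Int)) (dest : List (Int × Int)), dest = pvRebuild grid r b →
    xs.foldl (fun st x => if PySem.List.pyGetD (PySem.List.pyGetD grid y []) x 0 = 1 then (if ((PySem.List.pyRange (-r) (r + 1) 1).foldl (fun ic dy => (PySem.List.pyRange (-r) (r + 1) 1).foldl (fun ic dx => if PySem.List.pyGetD (PySem.List.pyGetD grid (y + dy) []) (x + dx) 0 = 1 then (ic.1 + 1, ic.2 ++ [(x + dx, y + dy)]) else ic) ic) ((0 : Int), ([] : List (Int × Int)))).1 > st.1 then (((PySem.List.pyRange (-r) (r + 1) 1).foldl (fun ic dy => (PySem.List.pyRange (-r) (r + 1) 1).foldl (fun ic dx => if PySem.List.pyGetD (PySem.List.pyGetD grid (y + dy) []) (x + dx) 0 = 1 then (ic.1 + 1, ic.2 ++ [(x + dx, y + dy)]) else ic) ic) ((0 : Int), ([] : List (Int × Int)))).1, some (x, y), ((PySem.List.pyRange (-r) (r + 1) 1).foldl (fun ic dy => (PySem.List.pyRange (-r) (r + 1) 1).foldl (fun ic dx => if PySem.List.pyGetD (PySem.List.pyGetD grid (y + dy) []) (x + dx) 0 = 1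 then (ic.1 + 1, ic.2 ++ [(x + dx, y + dy)]) else ic) ic) ((0 : Int), ([] : List (Int × Int)))).2) else st) else st) (bc, b, dest)
    = ((xs.foldl (fun st x => if PySem.List.pyGetD (PySem.List.pyGetD grid y []) x 0 = 1 then (if (PySem.List.pyGetD (PySem.List.pyGetD (List.map (fun i => pvRowFn grid i) (List.range (grid.length + 1))) (y + r + 1) []) (x + r + 1) 0 - PySem.List.pyGetD (PySem.List.pyGetD (List.map (fun i => pvRowFn grid i) (List.range (grid.length + 1))) (y - r) []) (x + r + 1) 0 - PySem.List.pyGetD (PySem.List.pyGetD (List.map (fun i => pvRowFn grid i) (List.range (grid.length + 1))) (y + r + 1) []) (x - r) 0 + PySem.List.pyGetD (PySem.List.pyGetD (List.map (fun i => pvRowFn grid i) (List.range (grid.length + 1))) (y - r) []) (x - r) 0) > st.1 then ((PySem.List.pyGetD (PySem.List.pyGetD (List.map (fun i => pvRowFn grid i) (List.range (grid.length + 1))) (y + r + 1) []) (x + r + 1) 0 - PySem.List.pyGetD (PySem.List.pyGetD (List.map (fun i => pvRowFn grid i) (List.range (grid.length + 1))) (y - r) []) (x + r + 1) 0 - PySem.List.pyGetD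 (PySem.List.pyGetD (List.map (fun i => pvRowFn grid i) (List.range (grid.length + 1))) (y + r + 1) []) (x - r) 0 + PySem.List.pyGetD (PySem.List.pyGetD (List.map (fun i => pvRowFn grid i) (List.range (grid.length + 1))) (y - r) []) (x - r) 0), some (x, y)) else st) else st) (bc, b)).1, (xs.foldl (fun st x => if PySem.List.pyGetD (PySem.List.pyGetD grid y []) x 0 = 1 then (if (PySem.List.pyGetD (PySem.List.pyGetD (List.map (fun i => pvRowFn grid i) (List.range (grid.length + 1))) (y + r + 1) []) (x + r + 1) 0 - PySem.List.pyGetD (PySem.List.pyGetD (List.map (fun i => pvRowFn grid i) (List.range (grid.length + 1))) (y - r) []) (x + r + 1) 0 - PySem.List.pyGetD (PySem.List.pyGetD (List.map (fun i => pvRowFn grid i) (List.range (grid.length + 1))) (y + r + 1) []) (x - r) 0 + PySem.List.pyGetD (PySem.List.pyGetD (List.map (fun i => pvRowFn grid i) (List.range (grid.length + 1))) (y - r) []) (x - r) 0) > st.1 then ((PySem.List.pyGetD (PySem.List.pyGetD (List.map (fun i => pvRowFn grid i) (List.range (grid.length + 1))) (y + r + 1) []) (x + r + 1) 0 - PySem.List.pyGetD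 (PySem.List.pyGetD (List.map (fun i => pvRowFn grid i) (List.range (grid.length + 1))) (y - r) []) (x + r + 1) 0 - PySem.List.pyGetD (PySem.List.pyGetD (List.map (fun i => pvRowFn grid i) (List.range (grid.length + 1))) (y + r + 1) []) (x - r) 0 + PySem.List.pyGetD (PySem.List.pyGetD (List.map (fun i => pvRowFn grid i) (List.range (grid.length + 1))) (y - r) []) (x - r) 0), some (x, y)) else st) else st) (bc, b)).2, pvRebuild grid r (xs.foldl (fun st x => if PySem.List.pyGetD (PySem.List.pyGetD grid y []) x 0 = 1 then (if (PySem.List.pyGetD (PySem.List.pyGetD (List.map (fun i => pvRowFn grid i) (List.range (grid.length + 1))) (y + r + 1) []) (x + r + 1) 0 - PySem.List.pyGetD (PySem.List.pyGetD (List.map (fun i => pvRowFn grid i) (List.range (grid.length + 1))) (y - r) []) (x + r + 1) 0 - PySem.List.pyGetD (PySem.List.pyGetD (List.map (fun i => pvRowFn grid i) (List.range (grid.length + 1))) (y + r + 1) []) (x - r) 0 + PySem.List.pyGetD (PySem.List.pyGetD (List.map (fun i => pvRowFn grid i) (List.range (grid.length + 1))) (y - r) []) (x - r) 0) > st.1 then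 ((PySem.List.pyGetD (PySem.List.pyGetD (List.map (fun i => pvRowFn grid i) (List.range (grid.length + 1))) (y + r + 1) []) (x + r + 1) 0 - PySem.List.pyGetD (PySem.List.pyGetD (List.map (fun i => pvRowFn grid i) (List.range (grid.length + 1))) (y - r) []) (x + r + 1) 0 - PySem.List.pyGetD (PySem.List.pyGetD (List.map (fun i => pvRowFn grid i) (List.range (grid.length + 1))) (y + r + 1) []) (x - r) 0 + PySem.List.pyGetD (PySem.List.pyGetD (List.map (fun i => pvRowFn grid i) (List.range (grid.length + 1))) (y - r) []) (x - r) 0), some (x, y)) else st) else st) (bc, b)).2) := by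
  intro xs
  induction xs with
  | nil => intro _ bc b dest hdest; subst hdest; rfl
  | cons x xs ih =>
    intro hmem bc b dest hdest
    have hx := hmem x List.mem_cons_self
    have hmem' : ∀ x' ∈ xs, r ≤ x' ∧ x' < (grid.length : Int) - r :=
      fun x' hx' => hmem x' (List.mem_cons_of_mem _ hx')
    subst hdest
    simp only [List.foldl_cons]
    by_cases hcell : PySem.List.pyGetD (PySem.List.pyGetD grid y []) x 0 = 1
    · rw [if_pos hcell, if_pos hcell, pv_innerA grid r y x,
          pv_c_eq grid r y x hr hy1 hy2 hx.1 hx.2]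
      by_cases hgt : pvCnt grid r x y > bc
      · rw [if_pos hgt, if_pos hgt]
        exact ih hmem' (pvCnt grid r x y) (some (x, y)) (pvCoords grid r x y) rfl
      · rw [if_neg hgt, if_neg hgt]
        exact ih hmem' bc b (pvRebuild grid r b) rfl
    · rw [if_neg hcell, if_neg hcell]
      exact ih hmem' bc b (pvRebuild grid r b) rfl

theorem pv_scan_y (grid : List (List Int)) (r : Int) (hr : 0 ≤ r) :
    ∀ (ys : List Int), (∀ y ∈ ys, r ≤ y ∧ y < (grid.length : Int) - r) →
    ∀ (bc : Int) (b : Option (Int × Int)) (dest : List (Int × Int)), dest = pvRebuild grid r b →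
    ys.foldl (fun st y => (PySem.List.pyRange r ((grid.length : Int) - r) 1).foldl (fun st x => if PySem.List.pyGetD (PySem.List.pyGetD grid y []) x 0 = 1 then (if ((PySem.List.pyRange (-r) (r + 1) 1).foldl (fun ic dy => (PySem.List.pyRange (-r) (r + 1) 1).foldl (fun ic dx => if PySem.List.pyGetD (PySem.List.pyGetD grid (y + dy) []) (x + dx) 0 = 1 then (ic.1 + 1, ic.2 ++ [(x + dx, y + dy)]) else ic) ic) ((0 : Int), ([] : List (Int × Int)))).1 > st.1 then (((PySem.List.pyRange (-r) (r + 1) 1).foldl (fun ic dy => (PySem.List.pyRange (-r) (r + 1) 1).foldl (fun ic dx => if PySem.List.pyGetD (PySem.List.pyGetD grid (y + dy) []) (x + dx) 0 = 1 then (ic.1 + 1, ic.2 ++ [(x + dx, y + dy)]) else ic) ic) ((0 : Int), ([] : List (Int × Int)))).1, some (x, y), ((PySem.List.pyRange (-r) (r + 1) 1).foldl (fun ic dy => (PySem.List.pyRange (-r) (r + 1) 1).foldl (fun ic dx => if PySem.List.pyGetD (PySem.List.pyGetD grid (y + dy) []) (x + dx) 0 = 1 then (ic.1 + 1, ic.2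 ++ [(x + dx, y + dy)]) else ic) ic) ((0 : Int), ([] : List (Int × Int)))).2) else st) else st) st) (bc, b, dest)
    = ((ys.foldl (fun st y => (PySem.List.pyRange r ((grid.length : Int) - r) 1).foldl (fun st x => if PySem.List.pyGetD (PySem.List.pyGetD grid y []) x 0 = 1 then (if (PySem.List.pyGetD (PySem.List.pyGetD (List.map (fun i => pvRowFn grid i) (List.range (grid.length + 1))) (y + r + 1) []) (x + r + 1) 0 - PySem.List.pyGetD (PySem.List.pyGetD (List.map (fun i => pvRowFn grid i) (List.range (grid.length + 1))) (y - r) []) (x + r + 1) 0 - PySem.List.pyGetD (PySem.List.pyGetD (List.map (fun i => pvRowFn grid i) (List.range (grid.length + 1))) (y + r + 1) []) (x - r) 0 + PySem.List.pyGetD (PySem.List.pyGetD (List.map (fun i => pvRowFn grid i) (List.range (grid.length + 1))) (y - r) []) (x - r) 0) > st.1 then ((PySem.List.pyGetD (PySem.List.pyGetD (List.map (fun i => pvRowFn grid i) (List.range (grid.length + 1))) (y + r + 1) []) (x + r + 1) 0 - PySem.List.pyGetD (PySem.List.pyGetD (List.map (fun i => pvRowFn grid i) (List.range (grid.length + 1)))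 (y - r) []) (x + r + 1) 0 - PySem.List.pyGetD (PySem.List.pyGetD (List.map (fun i => pvRowFn grid i) (List.range (grid.length + 1))) (y + r + 1) []) (x - r) 0 + PySem.List.pyGetD (PySem.List.pyGetD (List.map (fun i => pvRowFn grid i) (List.range (grid.length + 1))) (y - r) []) (x - r) 0), some (x, y)) else st) else st) st) (bc, b)).1, (ys.foldl (fun st y => (PySem.List.pyRange r ((grid.length : Int) - r) 1).foldl (fun st x => if PySem.List.pyGetD (PySem.List.pyGetD grid y []) x 0 = 1 then (if (PySem.List.pyGetD (PySem.List.pyGetD (List.map (fun i => pvRowFn grid i) (List.range (grid.length + 1))) (y + r + 1) []) (x + r + 1) 0 - PySem.List.pyGetD (PySem.List.pyGetD (List.map (fun i => pvRowFn grid i) (List.range (grid.length + 1))) (y - r) []) (x + r + 1) 0 - PySem.List.pyGetD (PySem.List.pyGetD (List.map (fun i => pvRowFn grid i) (List.range (grid.length + 1))) (y + r + 1) []) (x - r) 0 + PySem.List.pyGetD (PySem.List.pyGetD (List.map (fun i => pvRowFn grid i) (List.range (grid.length + 1))) (y - r) []) (x - r) 0) > st.1 then ((PySem.List.pyGetD (PySem.List.pyGetD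 (List.map (fun i => pvRowFn grid i) (List.range (grid.length + 1))) (y + r + 1) []) (x + r + 1) 0 - PySem.List.pyGetD (PySem.List.pyGetD (List.map (fun i => pvRowFn grid i) (List.range (grid.length + 1))) (y - r) []) (x + r + 1) 0 - PySem.List.pyGetD (PySem.List.pyGetD (List.map (fun i => pvRowFn grid i) (List.range (grid.length + 1))) (y + r + 1) []) (x - r) 0 + PySem.List.pyGetD (PySem.List.pyGetD (List.map (fun i => pvRowFn grid i) (List.range (grid.length + 1))) (y - r) []) (x - r) 0), some (x, y)) else st) else st) st) (bc, b)).2, pvRebuild grid r (ys.foldl (fun st y => (PySem.List.pyRange r ((grid.length : Int) - r) 1).foldl (fun st x => if PySem.List.pyGetD (PySem.List.pyGetD grid y []) x 0 = 1 then (if (PySem.List.pyGetD (PySem.List.pyGetD (List.map (fun i => pvRowFn grid i) (List.range (grid.length + 1))) (y + r + 1) []) (x + r + 1) 0 - PySem.List.pyGetD (PySem.List.pyGetD (List.map (fun i => pvRowFn grid i) (List.range (grid.length + 1))) (y - r) []) (x + r + 1) 0 - PySem.List.pyGetD (PySem.List.pyGetD (List.map (fun i => pvRowFn grid i) (List.range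 (grid.length + 1))) (y + r + 1) []) (x - r) 0 + PySem.List.pyGetD (PySem.List.pyGetD (List.map (fun i => pvRowFn grid i) (List.range (grid.length + 1))) (y - r) []) (x - r) 0) > st.1 then ((PySem.List.pyGetD (PySem.List.pyGetD (List.map (fun i => pvRowFn grid i) (List.range (grid.length + 1))) (y + r + 1) []) (x + r + 1) 0 - PySem.List.pyGetD (PySem.List.pyGetD (List.map (fun i => pvRowFn grid i) (List.range (grid.length + 1))) (y - r) []) (x + r + 1) 0 - PySem.List.pyGetD (PySem.List.pyGetD (List.map (fun i => pvRowFn grid i) (List.range (grid.length + 1))) (y + r + 1) []) (x - r) 0 + PySem.List.pyGetD (PySem.List.pyGetD (List.map (fun i => pvRowFn grid i) (List.range (grid.length + 1))) (y - r) []) (x - r) 0), some (x, y)) else st) else st) st) (bc, b)).2) := by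
  intro ys
  induction ys with
  | nil => intro _ bc b dest hdest; subst hdest; rfl
  | cons y ys ih =>
    intro hmem bc b dest hdest
    have hy := hmem y List.mem_cons_self
    have hmem' : ∀ y' ∈ ys, r ≤ y' ∧ y' < (grid.length : Int) - r :=
      fun y' hy' => hmem y' (List.mem_cons_of_mem _ hy')
    subst hdest
    simp only [List.foldl_cons]
    rw [pv_scan_x grid r y hr hy.1 hy.2
          (PySem.List.pyRange r ((grid.length : Int) - r) 1)
          (fun x hx => PySem.List.mem_pyRange_one.mp hx) bc b (pvRebuild grid r b) rfl]
    exact ih hmem' _ _ _ rfl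

theorem pv_wrap (grid : List (List Int)) (r : Int) (b : Option (Int × Int)) :
    ((b, pvRebuild grid r b) : Option (Int × Int) × List (Int × Int))
    = match b with
      | none => (none, [])
      | some (bx, by_) =>
        (some (bx, by_),
          (PySem.List.pyRange (-r) (r + 1) 1).flatMap (fun dy =>
            ((PySem.List.pyRange (-r) (r + 1) 1).filter (fun dx =>
                decide (PySem.List.pyGetD (PySem.List.pyGetD grid (by_ + dy) []) (bx + dx) 0 = 1))).map
              (fun dx => (bx + dx, by_ + dy)))) := by
  cases b with
  | none => rfl
  | some p => cases p with | mk bx by_ => rfl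

theorem bombard_region_spec : Claim_equal_bombard_region := by
  intro grid m _hdom hpre
  obtain ⟨hm, _hrows⟩ := hpre
  have hr : 0 ≤ PySem.Int.floordiv m 2 := by
    rw [PySem.Int.floordiv_eq_ediv_of_pos (by norm_num)]
    exact Int.ediv_nonneg hm (by norm_num)
  unfold Spec_bombard_region bombard_region bombard_region_alt
  dsimp only
  by_cases hlt : PySem.Int.floordiv m 2 < (grid.length : Int) - PySem.Int.floordiv m 2
  · rw [if_pos hlt, pv_P_eq grid]
    rw [pv_scan_y grid (PySem.Int.floordiv m 2) hr
          (PySem.List.pyRange (PySem.Int.floordiv m 2) ((grid.length : Int) - PySem.Int.floordiv m 2) 1)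
          (fun y hy => PySem.List.mem_pyRange_one.mp hy) 0 none [] rfl]
    exact pv_wrap grid (PySem.Int.floordiv m 2) _
  · rw [if_neg hlt,
        PySem.List.pyRange_one_eq_nil (a := PySem.Int.floordiv m 2)
          (b := (grid.length : Int) - PySem.Int.floordiv m 2) (by omega)]
    rfl
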